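-- pv_equiv track=rewrite | github.com/Joseph-k-iype/rr | falkor_upload_json.py | parse_process_hierarchy
-- ===== SOURCE A (Python) =====
-- def parse_pipe_separated(value: str) -> list:
--     """
--     Parse pipe-separated OR comma-separated string into list of unique values
--     with deduplication
--     """
--     if not value:
--         return []
--
--     # Replace pipes with commas for unified splitting
--     normalized = value.replace('|', ',')
--
--     # Split, strip, and filter empty
--     items = [item.strip() for item in normalized.split(',') if item.strip()]
--
--     # Deduplicate while preserving order
--     seen = set()
--     unique_items = []
--     for item in items:
--         if item not in seen:
--             seen.add(item)
--             unique_items.append(item)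
--
--     return unique_items
--
-- def parse_process_hierarchy(process_string: str) -> list:
--     """
--     Parse process hierarchy string into (L1, L2, L3) tuples
--     with deduplication
--     """
--     if not process_string:
--         return []
--
--     hierarchies = []
--     seen = set()
--
--     # Split by pipe to get individual process paths
--     processes = parse_pipe_separated(process_string)
--
--     for process in processes:
--         # Split by dash to get hierarchy levels
--         parts = [p.strip() for p in process.split('-')]
--
--         # Extract L1, L2, L3 (pad with None if not enough parts)
--         l1 = parts[0] if len(parts) > 0 and parts[0] else None
--         l2 = parts[1] if len(parts) > 1 and parts[1] else None
--         l3 = parts[2] if len(parts) > 2 and parts[2] else None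
--
--         # Only add if at least L1 exists and not duplicate
--         if l1:
--             key = (l1, l2, l3)
--             if key not in seen:
--                 seen.add(key)
--                 hierarchies.append((l1, l2, l3))
--
--     return hierarchies
-- ===== SOURCE B (Python) =====
-- def parse_process_hierarchy(process_string: str) -> list:
--     """Character-level scanner: walk the string once char by char (with a sentinel
--     separator appended), accumulate the current token, and flush it on '|' or ','.
--     A flushed token is stripped, cut on '-', padded with '' up to three parts, turned
--     into an or-None triple, and appended if its L1 exists and the triple is not already
--     in the output list (dedup by scanning the result list itself; no seen set, no
--     replace/split of the whole string)."""
--     hierarchies = []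
--     token = []
--     for ch in process_string + ',':
--         if ch == '|' or ch == ',':
--             t = ''.join(token).strip()
--             token = []
--             if t:
--                 parts = [p.strip() for p in t.split('-')]
--                 while len(parts) < 3:
--                     parts.append('')
--                 key = (parts[0] or None, parts[1] or None, parts[2] or None)
--                 if key[0] is not None and key not in hierarchies:
--                     hierarchies.append(key)
--         else:
--             token.append(ch)
--     return hierarchies
-- ===== Notes on version B (the rewrite author's own statement) =====
-- stated objective: alternative
-- what changed: B replaces A's staged pipeline (replace pipes, library split, string-level order-preserving dedup with a set, then a second pass with a tuple seen-set) by a single character-level scan with an explicit token accumulator that flushes on '|' or ',', pads the dash-parts with '' in a while loop, and dedups by membership in the output list itself - no seen sets and no intermediate token list.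
import Mathlib
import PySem

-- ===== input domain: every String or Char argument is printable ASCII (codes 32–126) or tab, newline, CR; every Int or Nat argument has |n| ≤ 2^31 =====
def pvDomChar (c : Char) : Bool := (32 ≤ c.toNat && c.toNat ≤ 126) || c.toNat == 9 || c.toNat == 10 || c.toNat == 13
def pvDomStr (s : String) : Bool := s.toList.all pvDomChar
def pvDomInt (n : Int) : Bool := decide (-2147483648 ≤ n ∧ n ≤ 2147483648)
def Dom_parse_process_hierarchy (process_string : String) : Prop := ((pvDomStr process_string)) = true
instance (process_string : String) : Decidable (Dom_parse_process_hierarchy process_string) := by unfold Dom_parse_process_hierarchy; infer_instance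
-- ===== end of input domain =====

-- B replaces A's staged replace/split/dedup pipeline by a single character-level scan with an
-- explicit token accumulator and list-membership dedup (objective: alternative).


-- ===== PORT A =====
-- s.split(sep) for a nonempty literal sep (split? is none only for sep = ""; .getD [] is a totality guard)
def pySplitA (s sep : String) : List String := (PySem.Str.split? s sep).getD []

def parse_pipe_separated (value : String) : List String :=
  if value = "" then []
  else
    let normalized := PySem.Str.replace value "|" ","
    let items := (pySplitA normalized ",").filterMap
      (fun item => if PySem.Str.strip item ≠ "" then some (PySem.Str.strip item) else none)
    (items.foldl
      (fun (st : PySem.Set String × List String) item =>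
        if PySem.Set.contains st.1 item then st else (PySem.Set.add st.1 item, st.2 ++ [item]))
      (PySem.Set.empty, [])).2

def parse_process_hierarchy (process_string : String) : List (Option String × Option String × Option String) :=
  if process_string = "" then []
  else
    let processes := parse_pipe_separated process_string
    (processes.foldl
      (fun (st : PySem.Set (Option String × Option String × Option String) × List (Option String × Option String × Option String)) process =>
        let parts := (pySplitA process "-").map PySem.Str.strip
        let l1 : Option String := if 0 < parts.length ∧ parts.getD 0 "" ≠ "" then some (parts.getD 0 "") else none
        let l2 : Option String := if 1 < parts.length ∧ parts.getD 1 "" ≠ "" then some (parts.getD 1 "") else none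
        let l3 : Option String := if 2 < parts.length ∧ parts.getD 2 "" ≠ "" then some (parts.getD 2 "") else none
        if l1.isSome then
          let key : (Option String × Option String × Option String) := (l1, l2, l3)
          if PySem.Set.contains st.1 key then st else (PySem.Set.add st.1 key, st.2 ++ [key])
        else st)
      (PySem.Set.empty, [])).2

-- ===== PORT B =====
-- B's own split helper for token.split('-') (same totality guard)
def pySplitB (s sep : String) : List String := (PySem.Str.split? s sep).getD []

-- B's `while len(parts) < 3: parts.append('')`
def pphPad3 (ps : List String) : List String :=
  if ps.length < 3 then pphPad3 (ps ++ [""]) else ps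
termination_by 3 - ps.length

-- B's for-loop over the characters: `token` is the accumulator (consed, so in reverse),
-- `hierarchies` the output list; a '|' or ',' flushes the token.
def pphScan (chars : List Char) (token : List Char) (hierarchies : List (Option String × Option String × Option String)) : List (Option String × Option String × Option String) :=
  match chars with
  | [] => hierarchies
  | ch :: rest =>
    if ch = '|' ∨ ch = ',' then
      -- t = ''.join(token).strip()
      let t := String.ofList (PySem.Chars.strip token.reverse)
      if t ≠ "" then
        let parts := pphPad3 ((pySplitB t "-").map PySem.Str.strip)
        let key : Option String × Option String × Option String :=
          (if parts.getD 0 "" ≠ "" then some (parts.getD 0 "") else none,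
           if parts.getD 1 "" ≠ "" then some (parts.getD 1 "") else none,
           if parts.getD 2 "" ≠ "" then some (parts.getD 2 "") else none)
        if key.1.isSome ∧ key ∉ hierarchies then
          pphScan rest [] (hierarchies ++ [key])
        else pphScan rest [] hierarchies
      else pphScan rest [] hierarchies
    else pphScan rest (ch :: token) hierarchies

def parse_process_hierarchy_alt (process_string : String) : List (Option String × Option String × Option String) :=
  pphScan (process_string.toList ++ [',']) [] []

-- ===== PRECONDITION & SPEC =====
def Spec_parse_process_hierarchy (process_string : String) (out : List (Option String × Option String × Option String)) : Prop := out = parse_process_hierarchy_alt process_string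
instance (process_string : String) (out : List (Option String × Option String × Option String)) : Decidable (Spec_parse_process_hierarchy process_string out) := by unfold Spec_parse_process_hierarchy; infer_instance

-- ===== CLAIM (what is proved, stated in full; the proofs are below) =====
def Claim_equal_parse_process_hierarchy : Prop := ∀ (process_string : String), Dom_parse_process_hierarchy process_string → Spec_parse_process_hierarchy process_string (parse_process_hierarchy process_string)

-- ===== LEMMAS AND PROOFS =====

abbrev PPHKey := Option String × Option String × Option String
abbrev PPHSt := PySem.Set PPHKey × List PPHKey

-- pipe-to-comma, pointwise
def pphF (c : Char) : Char := if c = '|' then ',' else c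

-- recursive specification of splitting a char list on ','
def pphSpl : List Char → List (List Char)
  | [] => [[]]
  | c :: cs => if c = ',' then [] :: pphSpl cs
               else (c :: (pphSpl cs).headI) :: (pphSpl cs).tail

lemma pphHeadI_tail {α : Type} [Inhabited α] {l : List α} (h : l ≠ []) : l.headI :: l.tail = l := by
  cases l with
  | nil => exact absurd rfl h
  | cons a t => rfl

lemma pphSpl_ne_nil (l : List Char) : pphSpl l ≠ [] := by
  cases l with
  | nil => simp [pphSpl]
  | cons c cs => unfold pphSpl; split <;> simp

lemma pphReplace_go (fuel : ℕ) : ∀ (l acc : List Char), l.length ≤ fuel →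
    PySem.Chars.replace.go ['|'] [','] fuel l acc = acc.reverse ++ l.map pphF := by
  induction fuel with
  | zero => intro l acc h; simp at h; simp [h, PySem.Chars.replace.go]
  | succ n ih =>
    intro l acc h
    cases l with
    | nil => simp [PySem.Chars.replace.go]
    | cons c t =>
      simp only [PySem.Chars.replace.go, List.isPrefixOf]
      by_cases hc : c = '|'
      · subst hc
        simp only [List.length_cons] at h
        rw [if_pos (by simp)]
        simp only [List.length_singleton, List.drop_one, List.tail_cons, List.reverse_singleton,
          List.singleton_append]
        rw [ih t (',' :: acc) (by omega)]
        simp [pphF]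
      · rw [if_neg (by simp [hc, Ne.symm hc])]
        simp only [List.length_cons] at h
        rw [ih t (c :: acc) (by omega)]
        simp [pphF, hc]

lemma pphReplace_eq (l : List Char) :
    PySem.Chars.replace l ['|'] [','] = l.map pphF := by
  unfold PySem.Chars.replace
  rw [if_neg (by simp)]
  simpa using pphReplace_go l.length l [] le_rfl

lemma pphSplitOn_go (fuel : ℕ) : ∀ (l cur acc : List Char) (accs : List (List Char)), l.length < fuel →
    PySem.Chars.splitOn.go [','] fuel l cur accs =
      accs.reverse ++ (cur.reverse ++ (pphSpl l).headI) :: (pphSpl l).tail := by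
  induction fuel with
  | zero => intro l cur acc accs h; omega
  | succ n ih =>
    intro l cur _ accs h
    cases l with
    | nil => simp [PySem.Chars.splitOn.go, pphSpl]
    | cons c t =>
      simp only [PySem.Chars.splitOn.go]
      by_cases hc : c = ','
      · subst hc
        rw [if_pos (by simp [List.isPrefixOf])]
        simp only [List.length_cons] at h
        simp only [List.length_singleton, List.drop_one, List.tail_cons]
        rw [ih t [] [] (cur.reverse :: accs) (by omega),
          show pphSpl (',' :: t) = [] :: pphSpl t from if_pos rfl]
        simp [pphHeadI_tail (pphSpl_ne_nil t)]
      · rw [if_neg (by simp [List.isPrefixOf, hc, Ne.symm hc])]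
        simp only [List.length_cons] at h
        rw [ih t (c :: cur) [] accs (by omega),
          show pphSpl (c :: t) = (c :: (pphSpl t).headI) :: (pphSpl t).tail from if_neg hc]
        simp

lemma pphSplitOn_eq (l : List Char) :
    PySem.Chars.splitOn l [','] = pphSpl l := by
  unfold PySem.Chars.splitOn
  rw [pphSplitOn_go (l.length + 1) l [] [] [] (by omega)]
  simpa using pphHeadI_tail (pphSpl_ne_nil l)

-- the sequence of tokens B's scanner flushes
def pphToks : List Char → List Char → List (List Char)
  | [], _ => []
  | c :: rest, cur =>
    if c = '|' ∨ c = ',' then cur.reverse :: pphToks rest []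
    else pphToks rest (c :: cur)

lemma pphToks_spl (cs : List Char) : ∀ (cur : List Char),
    pphToks (cs ++ [',']) cur =
      (cur.reverse ++ (pphSpl (cs.map pphF)).headI) :: (pphSpl (cs.map pphF)).tail := by
  induction cs with
  | nil => intro cur; simp [pphToks, pphSpl]
  | cons c cs ih =>
    intro cur
    by_cases hc : c = '|' ∨ c = ','
    · have hf : pphF c = ',' := by rcases hc with h | h <;> simp [pphF, h]
      rw [List.cons_append, show pphToks (c :: (cs ++ [','])) cur = cur.reverse :: pphToks (cs ++ [',']) [] from if_pos hc,
        ih [], List.map_cons, hf,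
        show pphSpl (',' :: cs.map pphF) = [] :: pphSpl (cs.map pphF) from if_pos rfl]
      simp [pphHeadI_tail (pphSpl_ne_nil (cs.map pphF))]
    · have hf : pphF c = c := if_neg (fun h => hc (Or.inl h))
      have hcc : c ≠ ',' := fun h => hc (Or.inr h)
      rw [List.cons_append, show pphToks (c :: (cs ++ [','])) cur = pphToks (cs ++ [',']) (c :: cur) from if_neg hc,
        ih (c :: cur), List.map_cons, hf,
        show pphSpl (c :: cs.map pphF) = (c :: (pphSpl (cs.map pphF)).headI) :: (pphSpl (cs.map pphF)).tail from if_neg hcc]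
      simp

-- B's per-token body on the flushed (in-order) token, char-list form
def pphBFlushL (hierarchies : List PPHKey) (tok : List Char) : List PPHKey :=
  let t := String.ofList (PySem.Chars.strip tok)
  if t ≠ "" then
    let parts := pphPad3 ((pySplitB t "-").map PySem.Str.strip)
    let key : PPHKey :=
      (if parts.getD 0 "" ≠ "" then some (parts.getD 0 "") else none,
       if parts.getD 1 "" ≠ "" then some (parts.getD 1 "") else none,
       if parts.getD 2 "" ≠ "" then some (parts.getD 2 "") else none)
    if key.1.isSome ∧ key ∉ hierarchies then hierarchies ++ [key] else hierarchies
  else hierarchies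

lemma pphScan_toks (cs : List Char) : ∀ (cur : List Char) (h : List PPHKey),
    pphScan cs cur h = (pphToks cs cur).foldl pphBFlushL h := by
  induction cs with
  | nil => intro cur h; rfl
  | cons c rest ih =>
    intro cur h
    by_cases hc : c = '|' ∨ c = ','
    · rw [show pphToks (c :: rest) cur = cur.reverse :: pphToks rest [] from if_pos hc,
        List.foldl_cons, ← ih [] (pphBFlushL h cur.reverse)]
      show (if c = '|' ∨ c = ',' then _ else _) = _
      rw [if_pos hc]
      unfold pphBFlushL
      dsimp only
      split_ifs <;> rfl
    · rw [show pphToks (c :: rest) cur = pphToks rest (c :: cur) from if_neg hc]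
      rw [show pphScan (c :: rest) cur h = pphScan rest (c :: cur) h from by
        show (if c = '|' ∨ c = ',' then _ else _) = _
        rw [if_neg hc]]
      exact ih _ _

-- B's per-token body on the token as a string
def pphBFlushS (hierarchies : List PPHKey) (p : String) : List PPHKey :=
  let t := PySem.Str.strip p
  if t ≠ "" then
    let parts := pphPad3 ((pySplitB t "-").map PySem.Str.strip)
    let key : PPHKey :=
      (if parts.getD 0 "" ≠ "" then some (parts.getD 0 "") else none,
       if parts.getD 1 "" ≠ "" then some (parts.getD 1 "") else none,
       if parts.getD 2 "" ≠ "" then some (parts.getD 2 "") else none)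
    if key.1.isSome ∧ key ∉ hierarchies then hierarchies ++ [key] else hierarchies
  else hierarchies

lemma pphStrip_ofList (l : List Char) :
    PySem.Str.strip (String.ofList l) = String.ofList (PySem.Chars.strip l) := by
  apply String.toList_injective
  simp [pysem]

lemma pphBFlushL_eq (h : List PPHKey) (tok : List Char) :
    pphBFlushL h tok = pphBFlushS h (String.ofList tok) := by
  unfold pphBFlushL pphBFlushS
  rw [pphStrip_ofList]

-- pad3 on the possible shapes
lemma pphPad3_nil : pphPad3 [] = ["", "", ""] := by
  unfold pphPad3; unfold pphPad3; unfold pphPad3; unfold pphPad3; simp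
lemma pphPad3_one (a : String) : pphPad3 [a] = [a, "", ""] := by
  unfold pphPad3; unfold pphPad3; unfold pphPad3; simp
lemma pphPad3_two (a b : String) : pphPad3 [a, b] = [a, b, ""] := by
  unfold pphPad3; unfold pphPad3; simp
lemma pphPad3_ge (a b c : String) (r : List String) : pphPad3 (a :: b :: c :: r) = a :: b :: c :: r := by
  unfold pphPad3; simp

-- the key pphStep (A's body) would record for an already-stripped token
def pphKey? (p : String) : Option PPHKey :=
  let parts := (pySplitA p "-").map PySem.Str.strip
  let l1 : Option String := if parts.getD 0 "" ≠ "" then some (parts.getD 0 "") else none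
  let l2 : Option String := if 1 < parts.length ∧ parts.getD 1 "" ≠ "" then some (parts.getD 1 "") else none
  let l3 : Option String := if 2 < parts.length ∧ parts.getD 2 "" ≠ "" then some (parts.getD 2 "") else none
  if l1.isSome then some (l1, l2, l3) else none

-- B's padded key for the same token
def pphKeyB (t : String) : PPHKey :=
  let parts := pphPad3 ((pySplitB t "-").map PySem.Str.strip)
  (if parts.getD 0 "" ≠ "" then some (parts.getD 0 "") else none,
   if parts.getD 1 "" ≠ "" then some (parts.getD 1 "") else none,
   if parts.getD 2 "" ≠ "" then some (parts.getD 2 "") else none)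

lemma pphKeyB_eq (t : String) :
    pphKey? t = if (pphKeyB t).1.isSome then some (pphKeyB t) else none := by
  unfold pphKey? pphKeyB
  rw [show pySplitB = pySplitA from rfl]
  cases hp : (pySplitA t "-").map PySem.Str.strip with
  | nil => simp [pphPad3_nil, List.getD]
  | cons a l =>
    cases l with
    | nil =>
      by_cases h1 : a = "" <;> simp [pphPad3_one, List.getD, h1]
    | cons b l2 =>
      cases l2 with
      | nil =>
        by_cases h1 : a = "" <;> by_cases h2 : b = "" <;>
          simp [pphPad3_two, List.getD, h1, h2]
      | cons c l3 =>
        by_cases h1 : a = "" <;> simp [pphPad3_ge, List.getD, h1]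

-- A's inner-loop step on one already-stripped token
def pphStep (st : PPHSt) (p : String) : PPHSt :=
  let parts := (pySplitA p "-").map PySem.Str.strip
  let l1 : Option String := if parts.getD 0 "" ≠ "" then some (parts.getD 0 "") else none
  let l2 : Option String := if 1 < parts.length ∧ parts.getD 1 "" ≠ "" then some (parts.getD 1 "") else none
  let l3 : Option String := if 2 < parts.length ∧ parts.getD 2 "" ≠ "" then some (parts.getD 2 "") else none
  if l1.isSome then
    let key : PPHKey := (l1, l2, l3)
    if PySem.Set.contains st.1 key then st else (PySem.Set.add st.1 key, st.2 ++ [key])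
  else st

lemma pphStep_eq (st : PPHSt) (p : String) :
    pphStep st p = match pphKey? p with
      | none => st
      | some k => if PySem.Set.contains st.1 k then st
                  else (PySem.Set.add st.1 k, st.2 ++ [k]) := by
  unfold pphStep pphKey?
  cases hp : (pySplitA p "-").map PySem.Str.strip with
  | nil => simp
  | cons a l =>
    by_cases h1 : a ≠ ""
    · simp [List.getD, h1]
    · simp at h1; subst h1; simp

def pphTokF (item : String) : Option String :=
  if PySem.Str.strip item ≠ "" then some (PySem.Str.strip item) else none

-- the seen set of A's tuple loop mirrors its output list: fold with the set = fold with list membership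
lemma pphFold_inv (toks : List String) : ∀ (st : PPHSt),
    (∀ k : PPHKey, k ∈ st.1 ↔ k ∈ st.2) →
    toks.foldl pphBFlushS st.2 = ((toks.filterMap pphTokF).foldl pphStep st).2 := by
  induction toks with
  | nil => intro st _; rfl
  | cons t ts ih =>
    intro st hinv
    simp only [List.foldl_cons, List.filterMap_cons]
    by_cases hts : PySem.Str.strip t = ""
    · rw [show pphBFlushS st.2 t = st.2 by unfold pphBFlushS; simp [hts],
        show pphTokF t = none by simp [pphTokF, hts]]
      exact ih st hinv
    · rw [show pphTokF t = some (PySem.Str.strip t) by simp [pphTokF, hts]]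
      simp only [List.foldl_cons]
      have hb : pphBFlushS st.2 t =
          (if (pphKeyB (PySem.Str.strip t)).1.isSome ∧ pphKeyB (PySem.Str.strip t) ∉ st.2
           then st.2 ++ [pphKeyB (PySem.Str.strip t)] else st.2) := by
        unfold pphBFlushS pphKeyB
        simp [hts]
      rw [hb, pphStep_eq, pphKeyB_eq]
      by_cases h1 : (pphKeyB (PySem.Str.strip t)).1.isSome
      · simp only [if_pos h1]
        by_cases hm : pphKeyB (PySem.Str.strip t) ∈ st.2
        · have hc : PySem.Set.contains st.1 (pphKeyB (PySem.Str.strip t)) = true :=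
            (PySem.Set.contains_iff _ _).2 ((hinv _).2 hm)
          rw [if_neg (by simp [hm]), if_pos hc]
          exact ih st hinv
        · have hc : ¬ PySem.Set.contains st.1 (pphKeyB (PySem.Str.strip t)) = true :=
            fun h => hm ((hinv _).1 ((PySem.Set.contains_iff _ _).1 h))
          rw [if_pos ⟨h1, hm⟩, if_neg hc]
          exact ih (PySem.Set.add st.1 (pphKeyB (PySem.Str.strip t)),
              st.2 ++ [pphKeyB (PySem.Str.strip t)]) (by
            intro k
            show k ∈ st.1.add (pphKeyB (PySem.Str.strip t)) ↔
              k ∈ st.2 ++ [pphKeyB (PySem.Str.strip t)]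
            rw [PySem.Set.mem_add, List.mem_append, List.mem_singleton]
            exact or_congr (hinv k) Iff.rfl)
      · simp only [if_neg h1, if_neg (by simp [h1] : ¬ ((pphKeyB (PySem.Str.strip t)).1.isSome = true ∧ pphKeyB (PySem.Str.strip t) ∉ st.2))]
        exact ih st hinv

-- A's string-level dedup loop, recursive form, and its removal (the tuple dedup subsumes it)
def pphDedup (S : PySem.Set String) : List String → List String
  | [] => []
  | t :: ts => if t ∈ S then pphDedup S ts
               else t :: pphDedup (PySem.Set.add S t) ts

lemma pphDedup_foldl (items : List String) : ∀ (S : PySem.Set String) (acc : List String),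
    (items.foldl
      (fun (st : PySem.Set String × List String) item =>
        if PySem.Set.contains st.1 item then st else (PySem.Set.add st.1 item, st.2 ++ [item]))
      (S, acc)).2 = acc ++ pphDedup S items := by
  induction items with
  | nil => intro S acc; simp [pphDedup]
  | cons t ts ih =>
    intro S acc
    simp only [List.foldl_cons]
    by_cases h : t ∈ S
    · rw [pphDedup, if_pos h,
        if_pos (show PySem.Set.contains S t = true by simp [PySem.Set.contains_iff, h])]
      exact ih S acc
    · rw [pphDedup, if_neg h,
        if_neg (show ¬ PySem.Set.contains S t = true by simp [PySem.Set.contains_iff, h]),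
        ih]
      simp

def pphCovers (st : PPHSt) (t : String) : Prop :=
  ∀ k, pphKey? t = some k → k ∈ st.1

lemma pphStep_of_covers {st : PPHSt} {t : String} (h : pphCovers st t) : pphStep st t = st := by
  rw [pphStep_eq]
  cases hk : pphKey? t with
  | none => rfl
  | some k => simp [h k hk]

lemma pphMem_step_mono {st : PPHSt} {u : String} {k : PPHKey}
    (h : k ∈ st.1) : k ∈ (pphStep st u).1 := by
  rw [pphStep_eq]
  cases hk : pphKey? u with
  | none => exact h
  | some k' =>
    by_cases hc : k' ∈ st.1
    · simpa [hc] using h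
    · simp [hc, PySem.Set.mem_add, h]

lemma pphCovers_step_mono {st : PPHSt} {t u : String} (h : pphCovers st t) :
    pphCovers (pphStep st u) t := fun k hk => pphMem_step_mono (h k hk)

lemma pphCovers_step_self (st : PPHSt) (t : String) : pphCovers (pphStep st t) t := by
  intro k hk
  rw [pphStep_eq, hk]
  by_cases hc : k ∈ st.1
  · simpa [hc] using hc
  · simp [hc, PySem.Set.mem_add]

lemma pphFold_dedup (items : List String) : ∀ (S : PySem.Set String) (st : PPHSt),
    (∀ t ∈ S, pphCovers st t) →
    (pphDedup S items).foldl pphStep st = items.foldl pphStep st := by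
  induction items with
  | nil => intro S st _; rfl
  | cons t ts ih =>
    intro S st hS
    by_cases h : t ∈ S
    · rw [pphDedup, if_pos h, ih S st hS, List.foldl_cons, pphStep_of_covers (hS t h)]
    · rw [pphDedup, if_neg h, List.foldl_cons, List.foldl_cons]
      apply ih
      intro u hu
      rcases (PySem.Set.mem_add _ _ _).1 hu with hu' | rfl
      · exact pphCovers_step_mono (hS u hu')
      · exact pphCovers_step_self st u

-- A's inner loop body is pphStep (its `0 < parts.length` guard is redundant)
lemma pphA_body_eq_step (st : PPHSt) (p : String) :
    (let parts := (pySplitA p "-").map PySem.Str.strip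
     let l1 : Option String := if 0 < parts.length ∧ parts.getD 0 "" ≠ "" then some (parts.getD 0 "") else none
     let l2 : Option String := if 1 < parts.length ∧ parts.getD 1 "" ≠ "" then some (parts.getD 1 "") else none
     let l3 : Option String := if 2 < parts.length ∧ parts.getD 2 "" ≠ "" then some (parts.getD 2 "") else none
     if l1.isSome then
       let key : PPHKey := (l1, l2, l3)
       if PySem.Set.contains st.1 key then st else (PySem.Set.add st.1 key, st.2 ++ [key])
     else st) = pphStep st p := by
  unfold pphStep
  cases hp : (pySplitA p "-").map PySem.Str.strip with
  | nil => simp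
  | cons a l =>
    by_cases h1 : a ≠ ""
    · simp [List.getD, h1]
    · simp at h1; subst h1; simp

lemma pphA_foldl (l : List String) : ∀ (st : PPHSt),
    l.foldl
      (fun (st : PPHSt) process =>
        let parts := (pySplitA process "-").map PySem.Str.strip
        let l1 : Option String := if 0 < parts.length ∧ parts.getD 0 "" ≠ "" then some (parts.getD 0 "") else none
        let l2 : Option String := if 1 < parts.length ∧ parts.getD 1 "" ≠ "" then some (parts.getD 1 "") else none
        let l3 : Option String := if 2 < parts.length ∧ parts.getD 2 "" ≠ "" then some (parts.getD 2 "") else none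
        if l1.isSome then
          let key : PPHKey := (l1, l2, l3)
          if PySem.Set.contains st.1 key then st else (PySem.Set.add st.1 key, st.2 ++ [key])
        else st) st
    = l.foldl pphStep st := by
  induction l with
  | nil => intro st; rfl
  | cons a l ih => intro st; rw [List.foldl_cons, List.foldl_cons, pphA_body_eq_step, ih]

lemma pphPPS_eq (s : String) : parse_pipe_separated s =
    if s = "" then []
    else pphDedup PySem.Set.empty
      ((pySplitA (PySem.Str.replace s "|" ",") ",").filterMap pphTokF) := by
  unfold parse_pipe_separated
  by_cases hs : s = ""
  · simp [hs]
  · rw [if_neg hs, if_neg hs]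
    show ((((pySplitA (PySem.Str.replace s "|" ",") ",").filterMap pphTokF)).foldl
        (fun (st : PySem.Set String × List String) item =>
          if PySem.Set.contains st.1 item then st else (PySem.Set.add st.1 item, st.2 ++ [item]))
        (PySem.Set.empty, [])).2 = _
    rw [pphDedup_foldl, List.nil_append]

lemma pphA_eq (s : String) : parse_process_hierarchy s =
    if s = "" then []
    else ((parse_pipe_separated s).foldl pphStep (PySem.Set.empty, [])).2 := by
  unfold parse_process_hierarchy
  by_cases hs : s = ""
  · simp [hs]
  · rw [if_neg hs, if_neg hs]
    show ((parse_pipe_separated s).foldl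
      (fun (st : PPHSt) process =>
        let parts := (pySplitA process "-").map PySem.Str.strip
        let l1 : Option String := if 0 < parts.length ∧ parts.getD 0 "" ≠ "" then some (parts.getD 0 "") else none
        let l2 : Option String := if 1 < parts.length ∧ parts.getD 1 "" ≠ "" then some (parts.getD 1 "") else none
        let l3 : Option String := if 2 < parts.length ∧ parts.getD 2 "" ≠ "" then some (parts.getD 2 "") else none
        if l1.isSome then
          let key : PPHKey := (l1, l2, l3)
          if PySem.Set.contains st.1 key then st else (PySem.Set.add st.1 key, st.2 ++ [key])
        else st) (PySem.Set.empty, [])).2 = _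
    rw [pphA_foldl]

-- A's token list, as strings of B's flushed char-list tokens
lemma pphTokens_eq (s : String) :
    pySplitA (PySem.Str.replace s "|" ",") "," =
      (pphToks (s.toList ++ [',']) []).map String.ofList := by
  unfold pySplitA
  rw [show PySem.Str.split? (PySem.Str.replace s "|" ",") "," =
      some ((PySem.Chars.splitOn (PySem.Str.replace s "|" ",").toList [',']).map String.ofList) from by
    simp [PySem.Str.split?, PySem.Chars.split?]]
  simp only [Option.getD_some]
  rw [PySem.Str.toList_replace,
    show ("|".toList : List Char) = ['|'] from rfl,
    show (",".toList : List Char) = [','] from rfl,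
    pphReplace_eq, pphSplitOn_eq, pphToks_spl]
  simp only [List.reverse_nil, List.nil_append]
  rw [pphHeadI_tail (pphSpl_ne_nil _)]

-- ===== VERDICT (by name: the statement is the Claim_ definition above) =====
theorem parse_process_hierarchy_spec : Claim_equal_parse_process_hierarchy := by
  intro s _
  unfold Spec_parse_process_hierarchy parse_process_hierarchy_alt
  rw [pphScan_toks]
  by_cases hs : s = ""
  · subst hs
    rw [show ("".toList ++ [','] : List Char) = [','] from rfl,
      show pphToks [','] [] = [[]] from rfl]
    simp only [List.foldl_cons, List.foldl_nil]
    rw [show pphBFlushL [] [] = [] from by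
      unfold pphBFlushL
      rw [show PySem.Chars.strip ([] : List Char) = [] from rfl]
      simp]
    simp [parse_process_hierarchy]
  · have hmap : ∀ (toks : List (List Char)) (h : List PPHKey),
        toks.foldl pphBFlushL h = (toks.map String.ofList).foldl pphBFlushS h := by
      intro toks h
      rw [List.foldl_map]
      exact PySem.List.foldl_congr_mem _ _ _ _ (fun acc t _ => pphBFlushL_eq acc t)
    rw [hmap, ← pphTokens_eq]
    rw [pphFold_inv _ (PySem.Set.empty, []) (by intro k; simp [PySem.Set.empty])]
    rw [pphA_eq, if_neg hs, pphPPS_eq, if_neg hs,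
      pphFold_dedup _ _ _ (by intro t ht; simp [PySem.Set.empty] at ht)]
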